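-- pv_equiv track=rewrite | github.com/tomandesMSH/Just-Shapes-and-Beats-save-editor | JSaB-Editor.py | _encode_body
-- ===== SOURCE A (Python) =====
-- def _encode_body(json_str):
--     json_str = json_str.replace('false', 'hanse').replace('true', 'vtue')
--     result, in_string, i = [], False, 0
--     while i < len(json_str):
--         c = json_str[i]
--         if c == '"':
--             result.append('$');  in_string = not in_string
--         elif in_string:
--             result.append(c)
--         else:
--             if c == ':':
--                 result.append('<')
--             elif c == ',':
--                 result.append('.')
--             elif c == '.':
--                 leading_zero = (result and result[-1] == '0'
--                                 and (len(result) < 2 or not result[-2].isdigit()))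
--                 if leading_zero:
--                     result.pop()
--                 result.append(':')
--                 if (i + 1 < len(json_str) and json_str[i + 1] == '0'
--                         and i + 2 < len(json_str)
--                         and json_str[i + 2] in (',', '}', ']')):
--                     i += 1   # skip trailing zero of 0.0, keep separator
--             else:
--                 result.append(c)
--         i += 1
--     obf = ''.join(result)
--     return ''.join(chr(ord(c) + 0x7F) for c in obf)
-- ===== SOURCE B (Python) =====
-- def _encode_body(json_str):
--     # Stateless per-character classification with input lookaround instead of
--     # A's stateful loop with result pops and index skips: each character of the
--     # (false/true-substituted) string is mapped to '', itself, or a substitute,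
--     # based only on its neighbours and the quote parity of the prefix.
--     s = json_str.replace('false', 'hanse').replace('true', 'vtue')
--
--     def emit(j, c, inside):
--         if c == '"':
--             return '$'
--         if inside:
--             return c
--         if c == ':':
--             return '<'
--         if c == ',':
--             return '.'
--         if c == '.':
--             return ':'
--         if c == '0':
--             if (j + 1 < len(s) and s[j + 1] == '.'
--                     and (j == 0 or not s[j - 1].isdigit())):
--                 return ''  # leading zero of e.g. 0.5
--             if (1 <= j and s[j - 1] == '.'
--                     and j + 1 < len(s) and s[j + 1] in ',}]'):
--                 return ''  # trailing zero of e.g. 0.0 before a separator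
--         return c
--
--     pieces = []
--     inside = False
--     for j, c in enumerate(s):
--         pieces.append(emit(j, c, inside))
--         if c == '"':
--             inside = not inside
--     return ''.join(chr(ord(ch) + 0x7F) for ch in ''.join(pieces))
-- ===== Notes on version B (the rewrite author's own statement) =====
-- stated objective: alternative
-- what changed: A's stateful while-loop (append/pop on the result list plus an in-loop index skip) is replaced by a stateless per-character classification with input lookaround: each character maps independently to nothing, itself or a substitute, decided from its two neighbours in the input and the quote parity of the prefix, so no pops or index mutation occur.
import Mathlib
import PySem

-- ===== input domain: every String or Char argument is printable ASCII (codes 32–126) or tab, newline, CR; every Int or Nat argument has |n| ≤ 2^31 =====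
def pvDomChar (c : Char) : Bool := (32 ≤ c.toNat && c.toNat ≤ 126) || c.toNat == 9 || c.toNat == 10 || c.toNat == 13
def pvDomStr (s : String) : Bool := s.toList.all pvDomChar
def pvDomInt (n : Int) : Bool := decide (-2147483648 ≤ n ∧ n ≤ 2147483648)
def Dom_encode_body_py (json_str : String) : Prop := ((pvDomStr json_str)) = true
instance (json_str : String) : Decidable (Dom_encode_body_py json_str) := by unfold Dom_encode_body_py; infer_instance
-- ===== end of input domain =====

-- B replaces A's stateful loop (result pops, index skips) by a stateless per-character
-- classification with input lookaround ('alternative' objective, same cost); return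
-- values proved equal on all of Dom.

-- ===== PORT A =====
-- Python's `result and result[-1]=='0' and (len(result)<2 or not result[-2].isdigit())`;
-- A's result list is kept REVERSED (head = last appended char).
def pvLeadZero (res : List Char) : Bool :=
  match res with
  | [] => false
  | c :: rest => c == '0' && (match rest with | [] => true | d :: _ => !PySem.Chars.isdigit d)

-- `chr(ord(c) + 0x7F)` (codes stay < 0x110000 on Dom)
def pvShift (c : Char) : Char := Char.ofNat (c.toNat + 0x7F)

-- A's while-loop over indices i, transliterated as recursion on the remaining
-- characters; `i += 1` inside the '.' branch = dropping the lookahead '0'.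
def encALoop : List Char → Bool → List Char → List Char
  | [], _, res => res
  | c :: rest, instr, res =>
    if c = '"' then encALoop rest (!instr) ('$' :: res)
    else if instr then encALoop rest instr (c :: res)
    else if c = ':' then encALoop rest instr ('<' :: res)
    else if c = ',' then encALoop rest instr ('.' :: res)
    else if c = '.' then
      -- pop the leading zero, append ':'
      let res2 := ':' :: (if pvLeadZero res then res.tail else res)
      match rest with
      | '0' :: d :: rest' =>
        if d = ',' ∨ d = '}' ∨ d = ']' then encALoop (d :: rest') instr res2
        else encALoop ('0' :: d :: rest') instr res2
      | r => encALoop r instr res2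
    else encALoop rest instr (c :: res)

def encode_body_py (json_str : String) : String :=
  let s := PySem.Str.replace (PySem.Str.replace json_str "false" "hanse") "true" "vtue"
  let res := encALoop s.toList false []
  String.mk (res.reverse.map pvShift)

-- ===== PORT B =====
-- `c in ',}]'`
def pvIsSep (c : Char) : Bool := c == ',' || c == '}' || c == ']'

-- B's leading-zero lookaround: s[j+1]=='.' and (j==0 or not s[j-1].isdigit())
def pvLead (s : List Char) (j : Nat) : Bool :=
  (s[j+1]? == some '.') && (decide (j = 0) || !(PySem.Chars.isdigit (s.getD (j-1) ' ')))

-- B's trailing-zero lookaround: 1<=j and s[j-1]=='.' and s[j+1] in ',}]'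
def pvTrail (s : List Char) (j : Nat) : Bool :=
  decide (1 ≤ j) && (s.getD (j-1) ' ' == '.') &&
    (match s[j+1]? with | some d => pvIsSep d | none => false)

-- B's emit(j, c, inside): '', the char itself, or its substitute
def emitB (s : List Char) (j : Nat) (c : Char) (inside : Bool) : List Char :=
  if c = '"' then ['$']
  else if inside then [c]
  else if c = ':' then ['<']
  else if c = ',' then ['.']
  else if c = '.' then [':']
  else if c = '0' then
    if pvLead s j then []
    else if pvTrail s j then []
    else [c]
  else [c]

-- `inside = not inside` on a quote
def qstep (b : Bool) (c : Char) : Bool := if c = '"' then !b else b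

-- B's `for j, c in enumerate(s)` loop, building the output front to back
def encBRun (s : List Char) : List Char → Nat → Bool → List Char
  | [], _, _ => []
  | c :: rest, j, inside => emitB s j c inside ++ encBRun s rest (j + 1) (qstep inside c)

def encode_body_py_alt (json_str : String) : String :=
  let s := PySem.Str.replace (PySem.Str.replace json_str "false" "hanse") "true" "vtue"
  String.mk ((encBRun s.toList s.toList 0 false).map pvShift)

-- ===== PRECONDITION & SPEC =====
def Spec_encode_body_py (json_str : String) (out : String) : Prop := out = encode_body_py_alt json_str
instance (json_str : String) (out : String) : Decidable (Spec_encode_body_py json_str out) := by unfold Spec_encode_body_py; infer_instance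

-- ===== CLAIM (what is proved, stated in full; the proofs are below) =====
def Claim_equal_encode_body_py : Prop := ∀ (json_str : String), Dom_encode_body_py json_str → Spec_encode_body_py json_str (encode_body_py json_str)

-- ===== LEMMAS AND PROOFS =====

-- quote parity of a prefix
def qpar (l : List Char) : Bool := l.foldl qstep false

-- "A has appended a leading zero that B already dropped" (pending pop)
def pendB (t : List Char) (j : Nat) : Bool :=
  match j with
  | 0 => false
  | k + 1 => (t[k]? == some '0') && (qpar (t.take (k + 1)) == false) && pvLead t k

-- "position j is a trailing zero that A skips over" (A never processes such a j)
def pvTB (t : List Char) (j : Nat) : Bool :=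
  (t[j]? == some '0') && (qpar (t.take j) == false) && pvTrail t j

lemma encBRun_snoc (s : List Char) (c : Char) :
    ∀ (l : List Char) (j : Nat) (b : Bool),
    encBRun s (l ++ [c]) j b = encBRun s l j b ++ emitB s (j + l.length) c (l.foldl qstep b) := by
  intro l
  induction l with
  | nil => intro j b; simp [encBRun]
  | cons d l ih =>
    intro j b
    simp only [List.cons_append, encBRun, List.foldl, List.append_assoc]
    rw [ih (j + 1) (qstep b d)]
    have : j + 1 + l.length = j + (d :: l).length := by simp; omega
    rw [this]

lemma qpar_succ (t : List Char) (j : Nat) (c : Char) (h : t[j]? = some c) :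
    qpar (t.take (j + 1)) = qstep (qpar (t.take j)) c := by
  rw [List.take_succ, h]
  simp [qpar, List.foldl_append]

lemma outB_succ (t : List Char) (j : Nat) (c : Char) (h : t[j]? = some c) (hj : j < t.length) :
    encBRun t (t.take (j + 1)) 0 false
      = encBRun t (t.take j) 0 false ++ emitB t j c (qpar (t.take j)) := by
  rw [List.take_succ, h]
  simp only [Option.toList_some]
  rw [encBRun_snoc]
  have hlen : (t.take j).length = j := by simp [List.length_take]; omega
  rw [hlen]
  simp [qpar]

lemma emitB_cases (s : List Char) (j : Nat) (c : Char) (b : Bool) :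
    emitB s j c b = [] ∨
      ∃ e, emitB s j c b = [e] ∧ PySem.Chars.isdigit e = PySem.Chars.isdigit c ∧
        (e = '0' → c = '0') := by
  unfold emitB
  split_ifs with h1 h2 h3 h4 h5 h6 h7 h8
  · exact Or.inr ⟨'$', rfl, by subst h1; decide, fun h => absurd h (by decide)⟩
  · exact Or.inr ⟨c, rfl, rfl, fun h => h⟩
  · exact Or.inr ⟨'<', rfl, by subst h3; decide, fun h => absurd h (by decide)⟩
  · exact Or.inr ⟨'.', rfl, by subst h4; decide, fun h => absurd h (by decide)⟩
  · exact Or.inr ⟨':', rfl, by subst h5; decide, fun h => absurd h (by decide)⟩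
  · exact Or.inl rfl
  · exact Or.inl rfl
  · exact Or.inr ⟨c, rfl, rfl, fun h => h⟩
  · exact Or.inr ⟨c, rfl, rfl, fun h => h⟩

lemma pendB_dot {t : List Char} {j : Nat} (h : pendB t j = true) : t[j]? = some '.' := by
  cases j with
  | zero => simp [pendB] at h
  | succ k =>
    simp only [pendB, pvLead, Bool.and_eq_true, beq_iff_eq] at h
    exact h.2.1

lemma emitB_nil_elim {s : List Char} {j : Nat} {c : Char} {b : Bool}
    (h : emitB s j c b = []) :
    c = '0' ∧ b = false ∧ (pvLead s j = true ∨ pvTrail s j = true) := by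
  unfold emitB at h
  split_ifs at h <;> simp_all

lemma qpar_take_nonquote {t : List Char} {k : Nat} {c : Char} (hk : t[k]? = some c)
    (hc : c ≠ '"') (hq : qpar (t.take (k + 1)) = false) : qpar (t.take k) = false := by
  rw [qpar_succ t k c hk] at hq
  simpa [qstep, hc] using hq

-- the crux: A's result-based leading-zero test equals B's input lookaround
lemma pvLeadZero_res (t : List Char) (j : Nat) (hdot : t[j]? = some '.')
    (hq : qpar (t.take j) = false) :
    pvLeadZero ((if pendB t j then ['0'] else []) ++ (encBRun t (t.take j) 0 false).reverse)
      = pendB t j := by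
  have hjlen : j < t.length := (List.getElem?_eq_some_iff.mp hdot).1
  by_cases hp : pendB t j = true
  · rw [hp, if_pos rfl]
    cases j with
    | zero => simp [pendB] at hp
    | succ k =>
      simp only [pendB, Bool.and_eq_true, beq_iff_eq] at hp
      obtain ⟨⟨hk0, hqk1⟩, hlead⟩ := hp
      have hklen : k < t.length := by omega
      have hqk : qpar (t.take k) = false := qpar_take_nonquote hk0 (by decide) hqk1
      have hB : encBRun t (t.take (k + 1)) 0 false = encBRun t (t.take k) 0 false := by
        rw [outB_succ t k '0' hk0 hklen, hqk]
        simp [emitB, hlead]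
      rw [hB]
      have hlead' := hlead
      simp only [pvLead, Bool.and_eq_true, Bool.or_eq_true, decide_eq_true_eq,
        Bool.not_eq_true'] at hlead'
      rcases hlead'.2 with hk | hdig
      · subst hk; simp [encBRun, pvLeadZero]
      · cases k with
        | zero => simp [encBRun, pvLeadZero]
        | succ k' =>
          have hk'len : k' < t.length := by omega
          have hd : t[k']? = some t[k'] := List.getElem?_eq_getElem hk'len
          have hdne : PySem.Chars.isdigit t[k'] = false := by
            have : t.getD (k' + 1 - 1) ' ' = t[k'] := by
              simp [List.getD_eq_getElem?_getD, hd]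
            rwa [this] at hdig
          rcases emitB_cases t k' t[k'] (qpar (t.take k')) with hnil | ⟨e, he, hdigE, _⟩
          · have := (emitB_nil_elim hnil).1
            rw [this] at hdne
            exact absurd hdne (by decide)
          · rw [outB_succ t k' t[k'] hd hk'len, he]
            simp [pvLeadZero, hdigE, hdne]
  · rw [if_neg hp, List.nil_append]
    simp only [Bool.not_eq_true] at hp
    rw [hp]
    cases j with
    | zero => simp [encBRun, pvLeadZero]
    | succ k =>
      have hklen : k < t.length := by omega
      have hck : t[k]? = some t[k] := List.getElem?_eq_getElem hklen
      rw [outB_succ t k t[k] hck hklen]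
      rcases emitB_cases t k t[k] (qpar (t.take k)) with hnil | ⟨e, he, hdigE, hzE⟩
      · obtain ⟨hck0, _, hlt⟩ := emitB_nil_elim hnil
        rcases hlt with hl | htr
        · -- pvLead true makes pendB true, contradicting hp
          exfalso
          have : pendB t (k + 1) = true := by
            simp only [pendB, Bool.and_eq_true, beq_iff_eq]
            exact ⟨⟨by rw [hck, hck0], hq⟩, hl⟩
          rw [hp] at this; exact Bool.false_ne_true this
        · -- pvTrail needs t[k+1] to be a separator, but it is '.'
          exfalso
          simp only [pvTrail, Bool.and_eq_true] at htr
          have h2 := htr.2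
          rw [hdot] at h2
          exact absurd h2 (by decide)
      · rw [he]
        by_cases hez : e = '0'
        · have hck0 : t[k] = '0' := hzE hez
          have hqk : qpar (t.take k) = false :=
            qpar_take_nonquote (by rw [hck, hck0]) (by decide) hq
          -- pendB is false and t[k+1] = '.', so pvLead t k must be false:
          have hlf : pvLead t k = false := by
            by_contra hc
            simp only [Bool.not_eq_false] at hc
            have : pendB t (k + 1) = true := by
              simp only [pendB, Bool.and_eq_true, beq_iff_eq]
              exact ⟨⟨by rw [hck, hck0], hq⟩, hc⟩
            rw [hp] at this; exact Bool.false_ne_true this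
          -- hence k = k'+1 with t[k'] a digit
          simp only [pvLead, Bool.and_eq_false_iff, Bool.or_eq_false_iff,
            beq_eq_false_iff_ne, decide_eq_false_iff_not] at hlf
          rcases hlf with hne | ⟨hkne, hdigk⟩
          · exact absurd hdot hne
          · cases k with
            | zero => exact absurd rfl hkne
            | succ k' =>
              have hk'len : k' < t.length := by omega
              have hd' : t[k']? = some t[k'] := List.getElem?_eq_getElem hk'len
              have hdig' : PySem.Chars.isdigit t[k'] = true := by
                have h2 : t.getD (k' + 1 - 1) ' ' = t[k'] := by
                  simp [List.getD_eq_getElem?_getD, hd']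
                rw [h2] at hdigk
                simpa using hdigk
              rcases emitB_cases t k' t[k'] (qpar (t.take k')) with hnil' | ⟨e2, he2, hdig2, _⟩
              · obtain ⟨_, _, hlt'⟩ := emitB_nil_elim hnil'
                exfalso
                rcases hlt' with hl' | ht'
                · simp only [pvLead, Bool.and_eq_true, beq_iff_eq] at hl'
                  have := hl'.1
                  rw [hck, hck0] at this
                  exact absurd this (by decide)
                · simp only [pvTrail, Bool.and_eq_true] at ht'
                  have := ht'.2
                  rw [hck, hck0] at this
                  exact absurd this (by decide)
              · rw [outB_succ t k' t[k'] hd' hk'len, he2]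
                simp [pvLeadZero, hez, hdig2, hdig']
        · simp [pvLeadZero, hez]

lemma pendB_false_of_ne_dot {t : List Char} {j : Nat} {c : Char} (hc : t[j]? = some c)
    (h : c ≠ '.') : pendB t j = false := by
  by_contra hq
  simp only [Bool.not_eq_false] at hq
  have hd := pendB_dot hq
  rw [hc] at hd
  exact h (by injection hd)

lemma pendB_succ_ne0 {t : List Char} {j : Nat} {c : Char} (hc : t[j]? = some c)
    (h : c ≠ '0') : pendB t (j + 1) = false := by
  simp [pendB, hc, h]

lemma pvTB_succ_ne_dot {t : List Char} {j : Nat} {c : Char} (hc : t[j]? = some c)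
    (h : c ≠ '.') : pvTB t (j + 1) = false := by
  simp [pvTB, pvTrail, List.getD_eq_getElem?_getD, hc, h]

lemma pendB_false_of_inside {t : List Char} {j : Nat} (h : qpar (t.take j) = true) :
    pendB t j = false := by
  cases j with
  | zero => rfl
  | succ k => simp [pendB, h]

-- the final state: at the end of the input the invariant gives exactly B's output
lemma encA_inv_end (t : List Char) (j : Nat) (res : List Char)
    (hj : t.length ≤ j)
    (hres : res = (if pendB t j then ['0'] else []) ++ (encBRun t (t.take j) 0 false).reverse) :
    res = (encBRun t t 0 false).reverse := by
  have hpend : pendB t j = false := by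
    by_contra hcq
    simp only [Bool.not_eq_false] at hcq
    have hd := pendB_dot hcq
    rw [List.getElem?_eq_none (by omega)] at hd
    exact absurd hd (by simp)
  rw [hres, hpend, List.take_of_length_le hj]
  simp

lemma encA_inv (t : List Char) : ∀ (n j : Nat) (instr : Bool) (res : List Char),
    t.length - j ≤ n →
    instr = qpar (t.take j) →
    res = (if pendB t j then ['0'] else []) ++ (encBRun t (t.take j) 0 false).reverse →
    pvTB t j = false →
    encALoop (t.drop j) instr res = (encBRun t t 0 false).reverse := by
  intro n
  induction n with
  | zero =>
    intro j instr res hn hq hres htb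
    have hj : t.length ≤ j := by omega
    rw [List.drop_eq_nil_iff.mpr hj, encALoop]
    exact encA_inv_end t j res hj hres
  | succ n ih =>
    intro j instr res hn hq hres htb
    cases hdrop : t.drop j with
    | nil =>
      have hj : t.length ≤ j := List.drop_eq_nil_iff.mp hdrop
      rw [encALoop]
      exact encA_inv_end t j res hj hres
    | cons c rest =>
      have hj : j < t.length := by
        by_contra hcon
        rw [List.drop_eq_nil_iff.mpr (by omega)] at hdrop
        exact absurd hdrop (by simp)
      have hc : t[j]? = some c := by
        have h := @List.head?_drop Char t j
        rw [hdrop] at h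
        exact h.symm
      have hrest : t.drop (j + 1) = rest := by
        have h := @List.tail_drop Char t j
        rw [hdrop] at h
        exact h.symm
      rw [encALoop]
      by_cases h1 : c = '"'
      · -- quote: '$', toggle parity
        rw [if_pos h1]
        have hpend : pendB t j = false := pendB_false_of_ne_dot hc (by rw [h1]; decide)
        rw [← hrest]
        apply ih (j + 1) (!instr) _ (by omega)
        · rw [qpar_succ t j c hc, hq, h1]; simp [qstep]
        · rw [pendB_succ_ne0 hc (by rw [h1]; decide), if_neg (by simp)]
          rw [outB_succ t j c hc hj, h1]
          rw [hres, hpend, if_neg (by simp)]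
          simp [emitB]
        · exact pvTB_succ_ne_dot hc (by rw [h1]; decide)
      · rw [if_neg h1]
        by_cases hin : instr = true
        · -- inside a string: verbatim
          rw [if_pos hin]
          have hqj : qpar (t.take j) = true := by rw [← hq, hin]
          have hpend : pendB t j = false := pendB_false_of_inside hqj
          have hq1 : qpar (t.take (j + 1)) = true := by
            rw [qpar_succ t j c hc, hqj]; simp [qstep, h1]
          rw [← hrest]
          apply ih (j + 1) instr _ (by omega)
          · rw [hq1, hin]
          · rw [pendB_false_of_inside hq1, if_neg (by simp)]
            rw [outB_succ t j c hc hj, hqj]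
            rw [hres, hpend, if_neg (by simp)]
            simp [emitB, h1]
          · simp [pvTB, hq1]
        · -- outside a string
          rw [if_neg hin]
          have hif : instr = false := by
            cases instr with
            | false => rfl
            | true => exact absurd rfl hin
          have hqj : qpar (t.take j) = false := by rw [← hq, hif]
          have hq1ne : ∀ d : Char, c = d → c ≠ '"' → qpar (t.take (j + 1)) = false := by
            intro d _ hne
            rw [qpar_succ t j c hc, hqj]; simp [qstep, hne]
          have hqs : qpar (t.take (j + 1)) = false := by
            rw [qpar_succ t j c hc, hqj]; simp [qstep, h1]
          by_cases h3 : c = ':'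
          · rw [if_pos h3]
            have hpend : pendB t j = false := pendB_false_of_ne_dot hc (by rw [h3]; decide)
            rw [← hrest]
            apply ih (j + 1) instr _ (by omega)
            · rw [hqs]; exact hif
            · rw [pendB_succ_ne0 hc (by rw [h3]; decide), if_neg (by simp)]
              rw [outB_succ t j c hc hj, hqj, h3]
              rw [hres, hpend, if_neg (by simp)]
              simp [emitB]
            · exact pvTB_succ_ne_dot hc (by rw [h3]; decide)
          · rw [if_neg h3]
            by_cases h4 : c = ','
            · rw [if_pos h4]
              have hpend : pendB t j = false := pendB_false_of_ne_dot hc (by rw [h4]; decide)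
              rw [← hrest]
              apply ih (j + 1) instr _ (by omega)
              · rw [hqs]; exact hif
              · rw [pendB_succ_ne0 hc (by rw [h4]; decide), if_neg (by simp)]
                rw [outB_succ t j c hc hj, hqj, h4]
                rw [hres, hpend, if_neg (by simp)]
                simp [emitB]
              · exact pvTB_succ_ne_dot hc (by rw [h4]; decide)
            · rw [if_neg h4]
              by_cases h5 : c = '.'
              · -- the interesting case
                rw [if_pos h5]
                have hdot : t[j]? = some '.' := by rw [hc, h5]
                have hlz : pvLeadZero res = pendB t j := by
                  rw [hres]; exact pvLeadZero_res t j hdot hqj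
                have hres2 : (':' :: (if pvLeadZero res then res.tail else res) : List Char)
                    = ':' :: (encBRun t (t.take j) 0 false).reverse := by
                  rw [hlz]
                  by_cases hp : pendB t j = true
                  · rw [hp, if_pos rfl, hres, hp, if_pos rfl]; rfl
                  · simp only [Bool.not_eq_true] at hp
                    rw [hp, if_neg (by simp), hres, hp, if_neg (by simp), List.nil_append]
                have hB1 : encBRun t (t.take (j + 1)) 0 false
                    = encBRun t (t.take j) 0 false ++ [':'] := by
                  rw [outB_succ t j c hc hj, hqj, h5]; rfl
                have hres2' : (':' :: (if pvLeadZero res then res.tail else res) : List Char)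
                    = (encBRun t (t.take (j + 1)) 0 false).reverse := by
                  rw [hB1, hres2]; simp
                have hpend1 : pendB t (j + 1) = false :=
                  pendB_succ_ne0 hc (by rw [h5]; decide)
                have hih1 : ∀ r : List Char, t.drop (j + 1) = r → pvTB t (j + 1) = false →
                    encALoop r instr ((encBRun t (t.take (j + 1)) 0 false).reverse)
                      = (encBRun t t 0 false).reverse := by
                  intro r hr htb1
                  have hih := ih (j + 1) instr
                    ((encBRun t (t.take (j + 1)) 0 false).reverse) (by omega)
                    (by rw [hqs]; exact hif)
                    (by rw [hpend1]; simp) htb1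
                  rw [hr] at hih
                  exact hih
                rw [hres2']
                split
                · -- rest = '0' :: d :: rest2 : the trailing-zero lookahead
                  rename_i rest0 d rest2
                  have hc1 : t[j + 1]? = some '0' := by
                    have h := @List.head?_drop Char t (j + 1)
                    rw [hrest] at h; exact h.symm
                  have hj1 : j + 1 < t.length := (List.getElem?_eq_some_iff.mp hc1).1
                  have hrest1 : t.drop (j + 2) = d :: rest2 := by
                    have h := @List.tail_drop Char t (j + 1)
                    rw [hrest] at h; exact h.symm
                  have hd : t[j + 2]? = some d := by
                    have h := @List.head?_drop Char t (j + 2)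
                    rw [hrest1] at h; exact h.symm
                  have hgd1 : t.getD j ' ' = '.' := by
                    simp [List.getD_eq_getElem?_getD, hdot]
                  by_cases hsep : d = ',' ∨ d = '}' ∨ d = ']'
                  · -- A skips the zero; B's emit for it is empty
                    rw [if_pos hsep]
                    have hdsep : pvIsSep d = true := by
                      rcases hsep with h | h | h <;> simp [pvIsSep, h]
                    have hdne : d ≠ '.' := by
                      rcases hsep with h | h | h <;> rw [h] <;> decide
                    have hq2 : qpar (t.take (j + 2)) = false := by
                      rw [qpar_succ t (j + 1) '0' hc1, hqs]; simp [qstep]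
                    have htr1 : pvTrail t (j + 1) = true := by
                      simp [pvTrail, List.getD_eq_getElem?_getD, hdot, hd, hdsep]
                    have hlead1 : pvLead t (j + 1) = false := by
                      simp [pvLead, hd, hdne]
                    have hB2 : encBRun t (t.take (j + 2)) 0 false
                        = encBRun t (t.take (j + 1)) 0 false := by
                      rw [outB_succ t (j + 1) '0' hc1 hj1, hqs]
                      simp [emitB, hlead1, htr1]
                    have hih := ih (j + 2) instr
                      ((encBRun t (t.take (j + 1)) 0 false).reverse) (by omega)
                      (by rw [hq2]; exact hif)
                      (by
                        have hpend2 : pendB t (j + 2) = false := by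
                          simp [pendB, hc1, hlead1]
                        rw [hpend2, hB2]; simp)
                      (by simp [pvTB, pvTrail, List.getD_eq_getElem?_getD, hc1])
                    rw [hrest1] at hih
                    exact hih
                  · rw [if_neg hsep]
                    have hdsep : pvIsSep d = false := by
                      simp only [pvIsSep, Bool.or_eq_false_iff, beq_eq_false_iff_ne]
                      exact ⟨⟨fun h => hsep (Or.inl h), fun h => hsep (Or.inr (Or.inl h))⟩,
                        fun h => hsep (Or.inr (Or.inr h))⟩
                    apply hih1 ('0' :: d :: rest2) hrest
                    simp [pvTB, pvTrail, hd, hdsep]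
                · -- fallthrough: rest does not start with '0' followed by anything
                  rename_i hne
                  apply hih1 rest hrest
                  match rest, hrest, hne with
                  | [], hrest, hne =>
                    have h2 : t[j + 1]? = none := by
                      have h := @List.head?_drop Char t (j + 1)
                      rw [hrest] at h; exact h.symm
                    simp [pvTB, h2]
                  | c1 :: tl, hrest, hne =>
                    have hc1 : t[j + 1]? = some c1 := by
                      have h := @List.head?_drop Char t (j + 1)
                      rw [hrest] at h; exact h.symm
                    match tl, hrest, hne with
                    | [], hrest, hne =>
                      have h2 : t[j + 2]? = none := by
                        have h := @List.tail_drop Char t (j + 1)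
                        rw [hrest] at h
                        have h3 := @List.head?_drop Char t (j + 2)
                        rw [← h] at h3; exact h3.symm
                      simp [pvTB, pvTrail, h2]
                    | d :: r2, hrest, hne =>
                      have hc10 : c1 ≠ '0' := by
                        intro hcon
                        exact hne d r2 (by rw [hcon])
                      simp [pvTB, hc1, hc10]
              · -- generic character
                rw [if_neg h5]
                have hpend : pendB t j = false := pendB_false_of_ne_dot hc h5
                rw [← hrest]
                by_cases hc0 : c = '0'
                · subst hc0
                  by_cases hl : pvLead t j = true
                  · -- B drops the leading zero now; A appends it (pending pop)
                    apply ih (j + 1) instr _ (by omega)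
                    · rw [hqs]; exact hif
                    · have hpend1 : pendB t (j + 1) = true := by
                        simp [pendB, hc, hqs, hl]
                      rw [hpend1, if_pos rfl]
                      have hB : encBRun t (t.take (j + 1)) 0 false
                          = encBRun t (t.take j) 0 false := by
                        rw [outB_succ t j '0' hc hj, hqj]
                        simp [emitB, hl]
                      rw [hB, hres, hpend, if_neg (by simp), List.nil_append]
                      rfl
                    · exact pvTB_succ_ne_dot hc (by decide)
                  · -- plain '0' kept by both
                    have htr : pvTrail t j = false := by
                      by_contra hcon
                      simp only [Bool.not_eq_false] at hcon
                      have : pvTB t j = true := by simp [pvTB, hc, hqj, hcon]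
                      rw [htb] at this; exact Bool.false_ne_true this
                    apply ih (j + 1) instr _ (by omega)
                    · rw [hqs]; exact hif
                    · have hpend1 : pendB t (j + 1) = false := by
                        simp [pendB, hl]
                      rw [hpend1, if_neg (by simp)]
                      rw [outB_succ t j '0' hc hj, hqj]
                      rw [hres, hpend, if_neg (by simp), List.nil_append]
                      simp [emitB, hl, htr]
                    · exact pvTB_succ_ne_dot hc (by decide)
                · -- any other character, verbatim
                  apply ih (j + 1) instr _ (by omega)
                  · rw [hqs]; exact hif
                  · rw [pendB_succ_ne0 hc hc0, if_neg (by simp)]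
                    rw [outB_succ t j c hc hj, hqj]
                    rw [hres, hpend, if_neg (by simp), List.nil_append]
                    simp [emitB, h1, h3, h4, h5, hc0]
                  · exact pvTB_succ_ne_dot hc h5

-- ===== VERDICT (by name: the statement is the Claim_ definition above) =====
theorem encode_body_py_spec : Claim_equal_encode_body_py := by
  intro s _
  unfold Spec_encode_body_py
  simp only [encode_body_py, encode_body_py_alt]
  set t := (PySem.Str.replace (PySem.Str.replace s "false" "hanse") "true" "vtue").toList with ht
  have h := encA_inv t t.length 0 false [] (by omega) (by simp [qpar]) (by simp [pendB, encBRun]) (by simp [pvTB, pvTrail])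
  simp only [List.drop_zero] at h
  rw [h, List.reverse_reverse]
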